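-- pv_equiv track=rewrite | github.com/TsukasaTakahashi/sumai_agent3 | backend/agents/location_agent.py | _has_ambiguity
-- ===== SOURCE A (Python) =====
-- from typing import Dict, Any, List, Optional
--
-- def _has_ambiguity(location_matches: List[Dict[str, Any]]) -> bool:
--     """
--     地域に曖昧さがあるかチェック
--     """
--     if len(location_matches) <= 1:
--         return False
--
--     # 同じ駅名で複数の都道府県にある場合は曖昧
--     if len(location_matches) > 1:
--         stations = set()
--         prefectures = set()
--         for match in location_matches:
--             stations.add(match.get("station", ""))
--             prefectures.add(match.get("prefecture", ""))
--
--         # 同じ駅名が複数の都道府県にある場合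
--         if len(stations) == 1 and len(prefectures) > 1:
--             return True
--
--     return len(location_matches) > 3  # 候補が多すぎる場合も曖昧とする
-- ===== SOURCE B (Python) =====
-- from typing import Dict, Any, List
--
-- def _has_ambiguity(location_matches: List[Dict[str, Any]]) -> bool:
--     if len(location_matches) <= 1:
--         return False
--     if len(location_matches) > 3:
--         return True
--     stations = sorted(m.get("station", "") for m in location_matches)
--     prefectures = sorted(m.get("prefecture", "") for m in location_matches)
--     return stations[0] == stations[-1] and prefectures[0] != prefectures[-1]
-- ===== Notes on version B (the rewrite author's own statement) =====
-- stated objective: alternative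
-- what changed: Replaces the set-accumulation pass and cardinality tests with staged early returns plus a sort-then-endpoints test: after the too-many-matches early return, the station and prefecture value lists are sorted and ambiguity is decided by comparing each sorted list's first and last element (all equal iff endpoints equal).
import Mathlib
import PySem

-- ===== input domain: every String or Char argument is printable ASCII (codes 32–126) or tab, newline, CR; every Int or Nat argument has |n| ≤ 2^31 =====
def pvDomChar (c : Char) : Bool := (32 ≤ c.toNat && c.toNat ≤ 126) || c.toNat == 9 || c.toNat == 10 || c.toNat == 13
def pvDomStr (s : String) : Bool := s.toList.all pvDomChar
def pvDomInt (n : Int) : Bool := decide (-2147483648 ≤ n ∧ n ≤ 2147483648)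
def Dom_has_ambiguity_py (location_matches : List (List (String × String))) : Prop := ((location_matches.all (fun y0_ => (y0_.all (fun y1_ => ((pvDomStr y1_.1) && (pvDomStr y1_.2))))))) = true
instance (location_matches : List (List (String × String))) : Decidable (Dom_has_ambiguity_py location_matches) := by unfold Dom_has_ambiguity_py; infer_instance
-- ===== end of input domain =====

-- B replaces A's set-accumulation and cardinality tests with staged early returns and a
-- sort-then-endpoints test (all values equal iff the sorted list's first and last agree): alternative algorithm.

-- m.get(k, "") on an insertion-ordered dict (association list, first match)
def pvGet (m : List (String × String)) (k : String) : String :=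
  match m.find? (fun p => p.1 == k) with
  | some p => p.2
  | none => ""

-- ===== PORT A =====
def has_ambiguity_py (location_matches : List (List (String × String))) : Bool :=
  if location_matches.length ≤ 1 then false
  else
    -- for match in location_matches: stations.add(...); prefectures.add(...)
    let sp := location_matches.foldl
      (fun (sp : PySem.Set String × PySem.Set String) m =>
        (PySem.Set.add sp.1 (pvGet m "station"),
         PySem.Set.add sp.2 (pvGet m "prefecture")))
      (PySem.Set.empty, PySem.Set.empty)
    if sp.1.length = 1 ∧ 1 < sp.2.length then true
    else decide (3 < location_matches.length)

-- ===== PORT B =====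
def has_ambiguity_py_alt (location_matches : List (List (String × String))) : Bool :=
  if location_matches.length ≤ 1 then false
  else if 3 < location_matches.length then true
  else
    let stations := PySem.List.sorted (location_matches.map (fun m => pvGet m "station")) (fun s => s) false
    let prefectures := PySem.List.sorted (location_matches.map (fun m => pvGet m "prefecture")) (fun s => s) false
    (PySem.List.pyGet? stations 0 == PySem.List.pyGet? stations (-1)) &&
    (PySem.List.pyGet? prefectures 0 != PySem.List.pyGet? prefectures (-1))

-- ===== PRECONDITION & SPEC =====
def Spec_has_ambiguity_py (location_matches : List (List (String × String))) (out : Bool) : Prop := out = has_ambiguity_py_alt location_matches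
instance (location_matches : List (List (String × String))) (out : Bool) : Decidable (Spec_has_ambiguity_py location_matches out) := by unfold Spec_has_ambiguity_py; infer_instance

-- ===== CLAIM (what is proved, stated in full; the proofs are below) =====
def Claim_equal_has_ambiguity_py : Prop := ∀ (location_matches : List (List (String × String))), Dom_has_ambiguity_py location_matches → Spec_has_ambiguity_py location_matches (has_ambiguity_py location_matches)

-- ===== LEMMAS AND PROOFS =====

-- the pair fold splits into two independent set folds
theorem pv_fold_split (l : List (List (String × String)))
    (s t : PySem.Set String) :
    l.foldl
      (fun (sp : PySem.Set String × PySem.Set String) m =>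
        (PySem.Set.add sp.1 (pvGet m "station"),
         PySem.Set.add sp.2 (pvGet m "prefecture")))
      (s, t)
    = (l.foldl (fun s m => PySem.Set.add s (pvGet m "station")) s,
       l.foldl (fun t m => PySem.Set.add t (pvGet m "prefecture")) t) := by
  induction l generalizing s t with
  | nil => rfl
  | cons h tl ih => simpa using ih _ _

-- folding "add (f m)" over l equals folding add over the mapped list
theorem pv_fold_add_map (f : List (String × String) → String)
    (l : List (List (String × String))) (s : PySem.Set String) :
    l.foldl (fun s m => PySem.Set.add s (f m)) s = (l.map f).foldl PySem.Set.add s := by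
  induction l generalizing s with
  | nil => rfl
  | cons h tl ih => simpa using ih _

theorem pv_ofList_singleton (x : String) (xs : List String)
    (h : ∀ y ∈ xs, y = x) : PySem.Set.ofList (x :: xs) = [x] := by
  have key : ∀ (ys : List String), (∀ y ∈ ys, y = x) →
      ∀ (s : PySem.Set String), x ∈ s → ys.foldl PySem.Set.add s = s := by
    intro ys
    induction ys with
    | nil => intro _ s _; rfl
    | cons y zs ih =>
      intro hall s hx
      have hy : y = x := hall y (by simp)
      simp only [List.foldl, hy, PySem.Set.add_of_mem hx]
      exact ih (fun z hz => hall z (by simp [hz])) s hx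
  rw [PySem.Set.ofList_eq_foldl]
  simp only [List.foldl]
  have e : PySem.Set.add ([] : PySem.Set String) x = [x] := rfl
  rw [e]
  exact key xs h [x] (by simp)

theorem pv_len_one_iff (x : String) (xs : List String) :
    (PySem.Set.ofList (x :: xs)).length = 1 ↔ ∀ y ∈ xs, y = x := by
  constructor
  · intro h1 y hy
    have hmem : y ∈ PySem.Set.ofList (x :: xs) := by
      rw [PySem.Set.mem_ofList]; simp [hy]
    have hx : x ∈ PySem.Set.ofList (x :: xs) := by
      rw [PySem.Set.mem_ofList]; simp
    obtain ⟨a, ha⟩ := List.length_eq_one_iff.mp h1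
    rw [ha] at hmem hx
    simp at hmem hx
    rw [hmem, hx]
  · intro h
    rw [pv_ofList_singleton x xs h]
    rfl

theorem pv_len_gt_one_iff (x : String) (xs : List String) :
    1 < (PySem.Set.ofList (x :: xs)).length ↔ ∃ y ∈ xs, y ≠ x := by
  have hx : x ∈ PySem.Set.ofList (x :: xs) := by
    rw [PySem.Set.mem_ofList]; simp
  have hpos : 0 < (PySem.Set.ofList (x :: xs)).length := List.length_pos_of_mem hx
  constructor
  · intro h
    by_contra hc
    rw [not_exists] at hc
    simp only [not_and, not_not] at hc
    have := (pv_len_one_iff x xs).mpr hc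
    omega
  · rintro ⟨y, hy, hne⟩
    rcases Nat.lt_or_ge 1 (PySem.Set.ofList (x :: xs)).length with h | h
    · exact h
    · exact absurd ((pv_len_one_iff x xs).mp (by omega) y hy) hne

-- in a Pairwise (≤) list every element is ≤ the last one
theorem pv_pw_le_last (s : List String) (hp : s.Pairwise (· ≤ ·)) (hne : s ≠ []) :
    ∀ y ∈ s, y ≤ s.getLast hne := by
  induction s with
  | nil => exact (hne rfl).elim
  | cons a u ih =>
    intro y hy
    cases u with
    | nil => simp at hy; simp [hy, List.getLast]
    | cons b v =>
      rw [List.pairwise_cons] at hp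
      rcases List.mem_cons.mp hy with rfl | hy'
      · have hlast : (b :: v).getLast (by simp) ∈ b :: v := List.getLast_mem _
        have := hp.1 _ hlast
        simpa [List.getLast_cons] using this
      · have := ih hp.2 (by simp) y hy'
        simpa [List.getLast_cons] using this

-- sorted endpoints equal ↔ all values in the original list are equal to its head
theorem pv_ends_eq_iff (x : String) (xs : List String) :
    ((PySem.List.pyGet? (PySem.List.sorted (x :: xs) (fun s => s) false) 0 ==
      PySem.List.pyGet? (PySem.List.sorted (x :: xs) (fun s => s) false) (-1)) = true)
    ↔ ∀ y ∈ xs, y = x := by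
  have hperm : (PySem.List.sorted (x :: xs) (fun s => s) false).Perm (x :: xs) :=
    PySem.List.sorted_perm _ _ _
  have hne : PySem.List.sorted (x :: xs) (fun s => s) false ≠ [] := by
    intro h; have := hperm.length_eq; simp [h] at this
  obtain ⟨a, u, hau⟩ : ∃ a u, PySem.List.sorted (x :: xs) (fun s => s) false = a :: u := by
    cases hs : PySem.List.sorted (x :: xs) (fun s => s) false with
    | nil => exact absurd hs hne
    | cons a u => exact ⟨a, u, rfl⟩
  have hhead_le : ∀ y ∈ x :: xs, a ≤ y := by
    have := PySem.List.key_head_sorted_le (xs := x :: xs) (key := fun s => s) hau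
    simpa using this
  have hpw : (a :: u).Pairwise (fun p q : String => p ≤ q) := by
    have := PySem.List.sorted_pairwise (xs := x :: xs) (key := fun s => s)
    rw [hau] at this
    simpa using this
  have hle_last : ∀ y ∈ a :: u, y ≤ (a :: u).getLast (by simp) :=
    pv_pw_le_last (a :: u) hpw (by simp)
  have hpmem : ∀ y, y ∈ a :: u ↔ y ∈ x :: xs := by
    intro y; rw [← hau]; exact hperm.mem_iff
  rw [hau, PySem.List.pyGet?_zero, PySem.List.pyGet?_neg_one,
      List.getLast?_eq_some_getLast (l := a :: u) (by simp)]
  simp only [List.getElem?_cons_zero]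
  constructor
  · intro h
    have heq : a = (a :: u).getLast (by simp) := by simpa using h
    have hall : ∀ y ∈ x :: xs, y = a := by
      intro y hy
      have h1 : a ≤ y := hhead_le y hy
      have h2 : y ≤ (a :: u).getLast (by simp) := hle_last y ((hpmem y).mpr hy)
      rw [← heq] at h2
      exact le_antisymm h2 h1
    intro y hy
    rw [hall y (by simp [hy]), hall x (by simp)]
  · intro h
    have hall : ∀ y ∈ a :: u, y = x := by
      intro y hy
      rcases List.mem_cons.mp ((hpmem y).mp hy) with rfl | hy'
      · rfl
      · exact h y hy'
    have ha : a = x := hall a (by simp)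
    have hl : (a :: u).getLast (by simp) = x := hall _ (List.getLast_mem (by simp))
    exact beq_iff_eq.mpr (congrArg some (ha.trans hl.symm))

-- ===== VERDICT (by name: the statement is the Claim_ definition above) =====
theorem has_ambiguity_py_spec : Claim_equal_has_ambiguity_py := by
  intro lm _
  show has_ambiguity_py lm = has_ambiguity_py_alt lm
  unfold has_ambiguity_py has_ambiguity_py_alt
  by_cases hlen : lm.length ≤ 1
  · simp [hlen]
  · simp only [if_neg hlen]
    by_cases hbig : 3 < lm.length
    · simp only [if_pos hbig]
      split_ifs <;> simp [hbig]
    · simp only [if_neg hbig]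
      obtain ⟨h, t, rfl⟩ : ∃ h t, lm = h :: t := by
        cases lm with
        | nil => simp at hlen
        | cons h t => exact ⟨h, t, rfl⟩
      simp only [pv_fold_split]
      rw [show (PySem.Set.empty : PySem.Set String) = ([] : List String) from rfl]
      rw [pv_fold_add_map, pv_fold_add_map, ← PySem.Set.ofList_eq_foldl, ← PySem.Set.ofList_eq_foldl]
      simp only [List.map]
      set fs := fun m : List (String × String) => pvGet m "station" with hfs
      set fp := fun m : List (String × String) => pvGet m "prefecture" with hfp
      have e1 : ((PySem.Set.ofList (fs h :: t.map fs)).length = 1)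
          ↔ (∀ y ∈ t, fs y = fs h) := by
        rw [pv_len_one_iff]; simp
      have e2 : (1 < (PySem.Set.ofList (fp h :: t.map fp)).length)
          ↔ (∃ y ∈ t, fp y ≠ fp h) := by
        rw [pv_len_gt_one_iff]; simp
      have b1 := pv_ends_eq_iff (fs h) (t.map fs)
      have b2 := pv_ends_eq_iff (fp h) (t.map fp)
      by_cases c : ((PySem.Set.ofList (fs h :: t.map fs)).length = 1
          ∧ 1 < (PySem.Set.ofList (fp h :: t.map fp)).length)
      · rw [if_pos c]
        obtain ⟨c1, c2⟩ := c
        have w1 : (PySem.List.pyGet? (PySem.List.sorted (fs h :: t.map fs) (fun s => s) false) 0 ==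
            PySem.List.pyGet? (PySem.List.sorted (fs h :: t.map fs) (fun s => s) false) (-1)) = true := by
          rw [b1]; intro y hy
          obtain ⟨m, hm, rfl⟩ := List.mem_map.mp hy
          exact e1.mp c1 m hm
        have hne' : ¬ ∀ y ∈ List.map fp t, y = fp h := by
          obtain ⟨y, hy, hd⟩ := e2.mp c2
          intro hall
          exact hd (hall (fp y) (List.mem_map.mpr ⟨y, hy, rfl⟩))
        have w2 : (PySem.List.pyGet? (PySem.List.sorted (fp h :: t.map fp) (fun s => s) false) 0 ==
            PySem.List.pyGet? (PySem.List.sorted (fp h :: t.map fp) (fun s => s) false) (-1)) = false := by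
          rw [Bool.eq_false_iff]
          intro hq
          exact hne' (b2.mp hq)
        rw [w1, bne, w2]; rfl
      · rw [if_neg c]
        rcases Decidable.em ((PySem.Set.ofList (fs h :: t.map fs)).length = 1) with h1 | h1
        · have h2 : ¬ (1 < (PySem.Set.ofList (fp h :: t.map fp)).length) := fun q => c ⟨h1, q⟩
          have w2 : (PySem.List.pyGet? (PySem.List.sorted (fp h :: t.map fp) (fun s => s) false) 0 ==
              PySem.List.pyGet? (PySem.List.sorted (fp h :: t.map fp) (fun s => s) false) (-1)) = true := by
            rw [b2]
            intro y hy
            obtain ⟨m, hm, rfl⟩ := List.mem_map.mp hy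
            by_contra hne
            exact h2 (e2.mpr ⟨m, hm, hne⟩)
          rw [bne, w2]
          simp only [List.length_cons] at hbig ⊢
          simp
          omega
        · have w1 : (PySem.List.pyGet? (PySem.List.sorted (fs h :: t.map fs) (fun s => s) false) 0 ==
              PySem.List.pyGet? (PySem.List.sorted (fs h :: t.map fs) (fun s => s) false) (-1)) = false := by
            rw [Bool.eq_false_iff]
            intro ha
            apply h1
            rw [e1]
            intro y hy
            exact b1.mp ha (fs y) (List.mem_map.mpr ⟨y, hy, rfl⟩)
          rw [w1]
          simp only [List.length_cons] at hbig ⊢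
          simp
          omega
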